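-- pv_equiv track=rewrite | github.com/zandermoss/AmpliTools | dev/MathematicaTranslator.py | GetL1BracketPositions
-- ===== SOURCE A (Python) =====
-- def GetL1BracketPositions(mystring):
-- 	""" Here, we search through the string, looking for
-- 	matching pairs of square brackets ("Catalan style").
-- 	Each additional nesting takes us up a "nestlevel".
-- 	This function finds the positions of the pairs of
-- 	[,] brackets that cross into the first nesting level.
-- 	This function allows us to break up the tensor expression.
-- 	"""
-- 	L1=[]
-- 	myL1=[]
-- 	nestlevel=0
-- 	for i,c in enumerate(mystring):
-- 		if c=='[':
-- 			if nestlevel==0: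
-- 				myL1.append(i)
-- 			nestlevel+=1
-- 		elif c==']':
-- 			nestlevel-=1
-- 			if nestlevel==0:
-- 				myL1.append(i)
-- 				L1.append(myL1)
-- 				myL1=[]
-- 	return L1
-- ===== SOURCE B (Python) =====
-- def GetL1BracketPositions(mystring):
--     # Two-pass table decomposition: first compute the nesting depth just
--     # before each character, then pair up level-0 opens with level-1 closes.
--     levels = []
--     depth = 0
--     for c in mystring:
--         levels.append(depth)
--         if c == '[':
--             depth += 1
--         elif c == ']':
--             depth -= 1
--     opens = [i for i, (c, l) in enumerate(zip(mystring, levels)) if c == '[' and l == 0]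
--     closes = [i for i, (c, l) in enumerate(zip(mystring, levels)) if c == ']' and l == 1]
--     return [[o, c] for o, c in zip(opens, closes)]
-- ===== Notes on version B (the rewrite author's own statement) =====
-- stated objective: alternative
-- what changed: Replaces A's single stateful counter loop (pending-pair list mutated in place) by a two-pass table decomposition: first build the nesting-depth-before-each-character table, then pair the depth-0 open-bracket positions with the depth-1 close-bracket positions by zipping the two filtered index lists.
import Mathlib
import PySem

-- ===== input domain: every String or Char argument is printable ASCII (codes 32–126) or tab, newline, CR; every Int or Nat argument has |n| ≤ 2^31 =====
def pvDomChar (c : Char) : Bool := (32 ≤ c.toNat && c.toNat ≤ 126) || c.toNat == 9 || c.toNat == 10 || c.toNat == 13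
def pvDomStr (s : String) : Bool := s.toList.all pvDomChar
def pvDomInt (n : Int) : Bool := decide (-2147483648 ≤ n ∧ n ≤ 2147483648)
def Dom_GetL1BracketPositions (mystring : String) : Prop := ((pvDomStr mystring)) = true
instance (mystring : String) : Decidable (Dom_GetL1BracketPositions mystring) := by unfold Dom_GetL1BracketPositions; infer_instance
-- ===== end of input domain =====

-- B replaces A's single stateful counter loop by a two-pass table decomposition
-- (depth table, then pair level-0 opens with level-1 closes); objective: alternative.

-- ===== PORT A =====
-- one loop step of A: state (L1, myL1, nestlevel), item (i, c)
def pvStepA (st : List (List Int) × List Int × Int) (ic : Int × Char) :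
    List (List Int) × List Int × Int :=
  if ic.2 = '[' then
    (st.1, (if st.2.2 = 0 then st.2.1 ++ [ic.1] else st.2.1), st.2.2 + 1)
  else if ic.2 = ']' then
    if st.2.2 - 1 = 0 then (st.1 ++ [st.2.1 ++ [ic.1]], [], st.2.2 - 1)
    else (st.1, st.2.1, st.2.2 - 1)
  else st

def GetL1BracketPositions (mystring : String) : List (List Int) :=
  ((PySem.List.enumerate mystring.toList 0).foldl pvStepA ([], [], 0)).1

-- ===== PORT B =====
-- one step of Source B's first loop: append current depth, then update it
def pvStepB (st : List Int × Int) (c : Char) : List Int × Int :=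
  (st.1 ++ [st.2], if c = '[' then st.2 + 1 else if c = ']' then st.2 - 1 else st.2)

def GetL1BracketPositions_alt (mystring : String) : List (List Int) :=
  let cs := mystring.toList
  let levels := (cs.foldl pvStepB ([], 0)).1
  let opens := ((PySem.List.enumerate (cs.zip levels) 0).filter
      (fun x => x.2.1 == '[' && x.2.2 == 0)).map (·.1)
  let closes := ((PySem.List.enumerate (cs.zip levels) 0).filter
      (fun x => x.2.1 == ']' && x.2.2 == 1)).map (·.1)
  (opens.zip closes).map (fun oc => [oc.1, oc.2])

-- ===== PRECONDITION & SPEC =====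
def Spec_GetL1BracketPositions (mystring : String) (out : List (List Int)) : Prop := out = GetL1BracketPositions_alt mystring
instance (mystring : String) (out : List (List Int)) : Decidable (Spec_GetL1BracketPositions mystring out) := by unfold Spec_GetL1BracketPositions; infer_instance

-- ===== CLAIM (what is proved, stated in full; the proofs are below) =====
def Claim_equal_GetL1BracketPositions : Prop := ∀ (mystring : String), Dom_GetL1BracketPositions mystring → Spec_GetL1BracketPositions mystring (GetL1BracketPositions mystring)

-- ===== LEMMAS AND PROOFS =====

-- depth update for one character
def pvStep (d : Int) (c : Char) : Int :=
  if c = '[' then d + 1 else if c = ']' then d - 1 else d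

-- recursive characterisation of B's depth table
def pvLevels : List Char → Int → List Int
  | [], _ => []
  | c :: t, d => d :: pvLevels t (pvStep d c)

lemma pvLevels_foldl (cs : List Char) : ∀ (acc : List Int) (d : Int),
    (cs.foldl pvStepB (acc, d)).1 = acc ++ pvLevels cs d := by
  induction cs with
  | nil => simp [pvLevels]
  | cons c t ih =>
      intro acc d
      simp [List.foldl, pvStepB, pvLevels, ih, pvStep]

-- recursive characterisations of B's two filtered index lists
def pvOpens : List Char → Int → Int → List Int
  | [], _, _ => []
  | c :: t, i, d =>
      (if c = '[' ∧ d = 0 then [i] else []) ++ pvOpens t (i + 1) (pvStep d c)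

def pvCloses : List Char → Int → Int → List Int
  | [], _, _ => []
  | c :: t, i, d =>
      (if c = ']' ∧ d = 1 then [i] else []) ++ pvCloses t (i + 1) (pvStep d c)

lemma pvOpens_char (cs : List Char) : ∀ (i d : Int),
    (((PySem.List.enumerate (cs.zip (pvLevels cs d)) i).filter
        (fun x => x.2.1 == '[' && x.2.2 == 0)).map (·.1)) = pvOpens cs i d := by
  induction cs with
  | nil => simp [pvLevels, pvOpens]
  | cons c t ih =>
      intro i d
      simp only [pvLevels, List.zip_cons_cons, PySem.List.enumerate_cons, List.filter_cons]
      by_cases h : c = '[' ∧ d = 0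
      · simp [pvOpens, h, ih]
      · have : ¬ (c == '[' && d == 0) = true := by
          simpa [decide_eq_true_eq] using h
        simp [pvOpens, this, h, ih]

lemma pvCloses_char (cs : List Char) : ∀ (i d : Int),
    (((PySem.List.enumerate (cs.zip (pvLevels cs d)) i).filter
        (fun x => x.2.1 == ']' && x.2.2 == 1)).map (·.1)) = pvCloses cs i d := by
  induction cs with
  | nil => simp [pvLevels, pvCloses]
  | cons c t ih =>
      intro i d
      simp only [pvLevels, List.zip_cons_cons, PySem.List.enumerate_cons, List.filter_cons]
      by_cases h : c = ']' ∧ d = 1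
      · simp [pvCloses, h, ih]
      · have : ¬ (c == ']' && d == 1) = true := by
          simpa [decide_eq_true_eq] using h
        simp [pvCloses, this, h, ih]

def pvPairs (o c : List Int) : List (List Int) :=
  (o.zip c).map (fun oc => [oc.1, oc.2])

lemma alt_char (s : String) :
    GetL1BracketPositions_alt s =
      pvPairs (pvOpens s.toList 0 0) (pvCloses s.toList 0 0) := by
  have hl : ((s.toList.foldl pvStepB ([], 0)).1) = pvLevels s.toList 0 := by
    simpa using pvLevels_foldl s.toList [] 0
  simp only [GetL1BracketPositions_alt, hl, pvOpens_char, pvCloses_char, pvPairs]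

-- the mutual invariant of A's loop: with depth ≤ 0 the pending list is empty,
-- with depth ≥ 1 it holds exactly the one pending level-0 open position
lemma loopA_main (cs : List Char) : ∀ (i d : Int) (L1 : List (List Int)),
    (d ≤ 0 →
      ((PySem.List.enumerate cs i).foldl pvStepA (L1, [], d)).1 =
        L1 ++ pvPairs (pvOpens cs i d) (pvCloses cs i d))
    ∧ (∀ o : Int, 1 ≤ d →
      ((PySem.List.enumerate cs i).foldl pvStepA (L1, [o], d)).1 =
        L1 ++ pvPairs (o :: pvOpens cs i d) (pvCloses cs i d)) := by
  induction cs with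
  | nil => intro i d L1; simp [PySem.List.enumerate_nil, pvOpens, pvCloses, pvPairs]
  | cons c t ih =>
      intro i d L1
      constructor
      · intro hd
        simp only [PySem.List.enumerate_cons, List.foldl_cons]
        by_cases hc : c = '['
        · by_cases hd0 : d = 0
          · subst hd0
            have := (ih (i + 1) 1 L1).2 i (le_refl 1)
            simp only [pvStepA, hc] at *
            simpa [pvOpens, pvCloses, hc, pvStep] using this
          · have hd1 : d + 1 ≤ 0 := by
              rcases lt_or_eq_of_le hd with h | h
              · omega
              · omega
            have := (ih (i + 1) (d + 1) L1).1 hd1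
            simp only [pvStepA, hc, if_neg hd0]
            simpa [pvOpens, pvCloses, hc, hd0, pvStep] using this
        · by_cases hc2 : c = ']'
          · have hne : d - 1 ≠ 0 := by omega
            have := (ih (i + 1) (d - 1) L1).1 (by omega)
            simp only [pvStepA, hc2, if_neg hne]
            have hd1 : ¬ (d = 1) := by omega
            simpa [pvOpens, pvCloses, hc, hc2, hd1, pvStep] using this
          · have := (ih (i + 1) d L1).1 hd
            simp only [pvStepA, if_neg hc, if_neg hc2]
            simpa [pvOpens, pvCloses, hc, hc2, pvStep] using this
      · intro o hd
        simp only [PySem.List.enumerate_cons, List.foldl_cons]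
        by_cases hc : c = '['
        · have hd0 : ¬ (d = 0) := by omega
          have := (ih (i + 1) (d + 1) L1).2 o (by omega)
          simp only [pvStepA, hc, if_neg hd0]
          simpa [pvOpens, pvCloses, hc, hd0, pvStep] using this
        · by_cases hc2 : c = ']'
          · by_cases hd1 : d = 1
            · subst hd1
              have := (ih (i + 1) 0 (L1 ++ [[o, i]])).1 (le_refl 0)
              simp only [pvStepA, hc2]
              norm_num
              simpa [pvOpens, pvCloses, hc, hc2, pvStep, pvPairs] using this
            · have hne : d - 1 ≠ 0 := by omega
              have := (ih (i + 1) (d - 1) L1).2 o (by omega)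
              simp only [pvStepA, hc2, if_neg hne]
              simpa [pvOpens, pvCloses, hc, hc2, hd1, pvStep] using this
          · have := (ih (i + 1) d L1).2 o hd
            simp only [pvStepA, if_neg hc, if_neg hc2]
            simpa [pvOpens, pvCloses, hc, hc2, pvStep] using this

-- ===== VERDICT (by name: the statement is the Claim_ definition above) =====
theorem GetL1BracketPositions_spec : Claim_equal_GetL1BracketPositions := by
  intro s _
  unfold Spec_GetL1BracketPositions
  have hA := (loopA_main s.toList 0 0 []).1 (le_refl 0)
  simp only [GetL1BracketPositions, hA, alt_char, List.nil_append]
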